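-- pv_equiv track=rewrite | github.com/DuttaSejuti/LCTracker | 1267-remove-zero-sum-consecutive-nodes-from-linked-list/remove-zero-sum-consecutive-nodes-from-linked-list.py | remove_zero_sum_subarray_from_array
-- ===== SOURCE A (Python) =====
-- from typing import List
--
-- def remove_zero_sum_subarray_from_array(array: List) -> List:
--     prefix_sum = 0
--     store_map = dict() # prefix_sum : index
--     store_map[0] = -1 # so that if a zero-sum occurs in the array, we would know from where to srart removinf
--
--     result = list()
--
--     # [2, 2]
--     # i = 2
--     # idx = 0
--     for i in range(len(array)):
--         prefix_sum += array[i]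
--         if prefix_sum in store_map:
--             idx = store_map[prefix_sum]
--             result = array[:idx+1] + array[i+1:]
--         else:
--             store_map[prefix_sum] = i
--     return result
-- ===== SOURCE B (Python) =====
-- from typing import List
--
-- def remove_zero_sum_subarray_from_array(array: List) -> List:
--     # Staged strategy: (1) materialise the prefix-sum array (pref[0] = 0,
--     # pref[k+1] = pref[k] + array[k]); (2) index the FIRST position of every
--     # prefix value; (3) scan positions from the RIGHT: the first position i
--     # whose prefix value already occurs earlier is A's last collision, and
--     # exactly one slice is built.
--     n = len(array)
--     pref = [0] * (n + 1)
--     for k in range(n):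
--         pref[k + 1] = pref[k] + array[k]
--     first = {}
--     for t in range(n + 1):
--         first.setdefault(pref[t], t)
--     for i in range(n, 0, -1):
--         j = first[pref[i]]
--         if j < i:
--             return array[:j] + array[i:]
--     return []
-- ===== Notes on version B (the rewrite author's own statement) =====
-- stated objective: faster
-- what changed: B drops A's forward collision loop that rebuilds an O(n) slice at every repeated prefix sum: it materialises the prefix-sum array, indexes the first position of each prefix value in one pass, then scans from the right and builds a single slice at the first (= last) collision.
import Mathlib
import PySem

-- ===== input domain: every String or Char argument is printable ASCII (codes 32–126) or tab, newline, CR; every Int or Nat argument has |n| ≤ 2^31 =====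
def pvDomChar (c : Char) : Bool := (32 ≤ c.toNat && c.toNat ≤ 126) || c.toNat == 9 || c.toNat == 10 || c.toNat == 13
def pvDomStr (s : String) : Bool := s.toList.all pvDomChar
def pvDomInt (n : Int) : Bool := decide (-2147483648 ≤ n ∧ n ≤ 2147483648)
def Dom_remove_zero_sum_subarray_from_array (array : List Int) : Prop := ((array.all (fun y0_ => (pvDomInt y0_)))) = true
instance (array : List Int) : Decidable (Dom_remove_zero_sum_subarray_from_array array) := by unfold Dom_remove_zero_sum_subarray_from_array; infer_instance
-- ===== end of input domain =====

-- B replaces A's forward collision loop (slice rebuilt at every collision) by staged passes: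
-- an explicit prefix-sum array, a first-occurrence index of it, and a backward scan returning
-- at the first (= last) collision with a single slice (objective: alternative).

-- ===== PORT A =====
-- state: (prefix_sum, store_map, result); one step per i in range(len(array))
def remove_zero_sum_subarray_from_array (array : List Int) : List Int :=
  let st :=
    (PySem.List.pyRange 0 (array.length : Int) 1).foldl
      (fun (st : Int × PySem.Dict Int Int × List Int) i =>
        let ps := st.1 + PySem.List.pyGetD array i 0  -- i ranges over range(len(array)): always in range
        match st.2.1.get? ps with
        | some idx =>
            (ps, st.2.1,
             PySem.List.slice array none (some (idx + 1)) ++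
             PySem.List.slice array (some (i + 1)) none)
        | none => (ps, st.2.1.insert ps i, st.2.2))
      (0, (PySem.Dict.empty).insert 0 (-1), [])
  st.2.2

-- ===== PORT B =====
-- running-prefix construction of the pref array (pref[0] = 0, pref[k+1] = pref[k] + array[k])
def pvPref (s : Int) : List Int → List Int
  | [] => [s]
  | x :: xs => s :: pvPref (s + x) xs

-- first occurrence index of every prefix value: for t in range(n+1): first.setdefault(pref[t], t)
def pvFirstMap (pref : List Int) : PySem.Dict Int Int :=
  (PySem.List.pyRange 0 (PySem.List.len pref) 1).foldl
    (fun d t => d.setdefault (PySem.List.pyGetD pref t 0) t) PySem.Dict.empty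

-- backward scan: for i in range(n, 0, -1): j = first[pref[i]]; if j < i: return …
def pvFindBack (array pref : List Int) (first : PySem.Dict Int Int) : List Int → List Int
  | [] => []
  | i :: rest =>
      match first.get? (PySem.List.pyGetD pref i 0) with
      | some j =>
          if j < i then
            PySem.List.slice array none (some j) ++
            PySem.List.slice array (some i) none
          else pvFindBack array pref first rest
      | none => pvFindBack array pref first rest  -- unreachable: every pref value is a key of first

def remove_zero_sum_subarray_from_array_alt (array : List Int) : List Int :=
  let pref := pvPref 0 array
  let first := pvFirstMap pref
  pvFindBack array pref first (PySem.List.pyRange (array.length : Int) 0 (-1))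

-- ===== PRECONDITION & SPEC =====
def Spec_remove_zero_sum_subarray_from_array (array : List Int) (out : List Int) : Prop := out = remove_zero_sum_subarray_from_array_alt array
instance (array : List Int) (out : List Int) : Decidable (Spec_remove_zero_sum_subarray_from_array array out) := by unfold Spec_remove_zero_sum_subarray_from_array; infer_instance

-- ===== CLAIM (what is proved, stated in full; the proofs are below) =====
def Claim_equal_remove_zero_sum_subarray_from_array : Prop := ∀ (array : List Int), Dom_remove_zero_sum_subarray_from_array array → Spec_remove_zero_sum_subarray_from_array array (remove_zero_sum_subarray_from_array array)

-- ===== LEMMAS AND PROOFS =====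

-- the prefix-sum list
def pvP (array : List Int) : List Int := pvPref 0 array

-- collision at A-step m (array index m): the prefix sum after m+1 elements occurs earlier
def pvHit (array : List Int) (m : Nat) : Bool :=
  decide ((pvP array).getD (m+1) 0 ∈ (pvP array).take (m+1))

-- the slice returned for a collision at step m
def pvOutAt (array : List Int) (m : Nat) : List Int :=
  match PySem.List.index? (pvP array) ((pvP array).getD (m+1) 0) with
  | some j => array.take j ++ array.drop (m+1)
  | none => []

-- A's result after the first m steps: the last collision among steps 0..m-1
def pvR (array : List Int) (m : Nat) : List Int :=
  match (List.range m).reverse.find? (pvHit array) with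
  | some k => pvOutAt array k
  | none => []

theorem pvPref_length (l : List Int) : ∀ s, (pvPref s l).length = l.length + 1 := by
  induction l with
  | nil => intro s; simp [pvPref]
  | cons x xs ih => intro s; simp [pvPref, ih]

theorem pvPref_getD_zero (l : List Int) (s : Int) : (pvPref s l).getD 0 0 = s := by
  cases l <;> simp [pvPref]

theorem pvPref_getD_succ (l : List Int) : ∀ s k, k < l.length →
    (pvPref s l).getD (k+1) 0 = (pvPref s l).getD k 0 + l.getD k 0 := by
  induction l with
  | nil => intro s k h; simp at h
  | cons x xs ih =>
      intro s k h
      cases k with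
      | zero =>
          simp only [pvPref, List.getD_cons_succ, List.getD_cons_zero, pvPref_getD_zero]
      | succ k =>
          simp only [pvPref, List.getD_cons_succ]
          exact ih (s + x) k (by simpa using h)

theorem pvP_getD_succ (array : List Int) (k : Nat) (h : k < array.length) :
    (pvP array).getD (k+1) 0 = (pvP array).getD k 0 + array.getD k 0 :=
  pvPref_getD_succ array 0 k h

theorem pv_take_succ_getD (L : List Int) (m : Nat) (h : m < L.length) :
    L.take (m+1) = L.take m ++ [L.getD m 0] := by
  rw [List.take_add_one, List.getD_eq_getElem?_getD, List.getElem?_eq_getElem h]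
  rfl

theorem pvP_take_succ (array : List Int) (m : Nat) (h : m < array.length) :
    (pvP array).take (m+2) = (pvP array).take (m+1) ++ [(pvP array).getD (m+1) 0] :=
  pv_take_succ_getD (pvP array) (m+1) (by rw [pvP, pvPref_length]; omega)

theorem pvP_length_take (array : List Int) (m : Nat) (h : m ≤ array.length) :
    ((pvP array).take (m+1)).length = m + 1 := by
  rw [List.length_take, pvP, pvPref_length]; omega

-- first-occurrence: the index of a value is < i iff the value occurs among the first i entries
theorem pv_index_lt_iff (P : List Int) (v : Int) (j i : Nat)
    (hj : PySem.List.index? P v = some j) : j < i ↔ v ∈ P.take i := by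
  obtain ⟨hk, hv, hmin⟩ := PySem.List.getElem_of_index?_eq_some hj
  constructor
  · intro hlt
    have hjl : j < (P.take i).length := by simp [List.length_take]; omega
    have : (P.take i)[j] = v := by rw [List.getElem_take]; exact hv
    exact this ▸ List.getElem_mem hjl
  · intro hmem
    obtain ⟨k, hk2, hkv⟩ := List.getElem_of_mem hmem
    have hk3 : k < i := by have := hk2; simp [List.length_take] at this; omega
    by_contra hge
    have hkj : k < j := by omega
    exact hmin k hkj (by rw [← hkv, List.getElem_take])

-- index over the whole list agrees with index over a prefix containing the value
theorem pv_index_take (P : List Int) (v : Int) (i : Nat) (hmem : v ∈ P.take i) :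
    PySem.List.index? P v = PySem.List.index? (P.take i) v := by
  conv_lhs => rw [← List.take_append_drop i P]
  exact PySem.List.index?_append_of_mem _ hmem

-- A's fold invariant
theorem pvA_inv (array : List Int) : ∀ m, m ≤ array.length →
    ((List.range m).foldl
      (fun (st : Int × PySem.Dict Int Int × List Int) (k : Nat) =>
        let ps := st.1 + array.getD k 0
        match st.2.1.get? ps with
        | some idx =>
            (ps, st.2.1,
             PySem.List.slice array none (some (idx + 1)) ++
             PySem.List.slice array (some ((k : Int) + 1)) none)
        | none => (ps, st.2.1.insert ps (k : Int), st.2.2))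
      (0, (PySem.Dict.empty).insert 0 (-1), [])).1 = (pvP array).getD m 0 ∧
    (∀ s, ((List.range m).foldl
      (fun (st : Int × PySem.Dict Int Int × List Int) (k : Nat) =>
        let ps := st.1 + array.getD k 0
        match st.2.1.get? ps with
        | some idx =>
            (ps, st.2.1,
             PySem.List.slice array none (some (idx + 1)) ++
             PySem.List.slice array (some ((k : Int) + 1)) none)
        | none => (ps, st.2.1.insert ps (k : Int), st.2.2))
      (0, (PySem.Dict.empty).insert 0 (-1), [])).2.1.get? s =
        Option.map (fun j : Nat => (j : Int) - 1) (PySem.List.index? ((pvP array).take (m+1)) s)) ∧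
    ((List.range m).foldl
      (fun (st : Int × PySem.Dict Int Int × List Int) (k : Nat) =>
        let ps := st.1 + array.getD k 0
        match st.2.1.get? ps with
        | some idx =>
            (ps, st.2.1,
             PySem.List.slice array none (some (idx + 1)) ++
             PySem.List.slice array (some ((k : Int) + 1)) none)
        | none => (ps, st.2.1.insert ps (k : Int), st.2.2))
      (0, (PySem.Dict.empty).insert 0 (-1), [])).2.2 = pvR array m := by
  intro m
  induction m with
  | zero =>
      intro _
      simp only [List.range_zero, List.foldl_nil]
      refine ⟨by simp only [pvP, pvPref_getD_zero], ?_, by simp [pvR]⟩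
      intro s
      have h1 : (pvP array).take 1 = [0] := by
        cases array <;> simp [pvP, pvPref, List.take_add_one]
      rw [h1, PySem.Dict.get?_insert]
      by_cases hs : s = 0
      · subst hs; rw [PySem.List.index?_cons_self]; simp
      · have h2 : PySem.List.index? [(0:Int)] s = none := by
          rw [PySem.List.index?_eq_none_iff]; simp [hs]
        rw [if_neg hs, PySem.Dict.get?_empty, h2]; rfl
  | succ m ih =>
      intro hm
      have hmn : m < array.length := by omega
      obtain ⟨h1, h2, h3⟩ := ih (by omega)
      rw [List.range_succ, List.foldl_append, List.foldl_cons, List.foldl_nil]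
      set st := (List.range m).foldl
        (fun (st : Int × PySem.Dict Int Int × List Int) (k : Nat) =>
          let ps := st.1 + array.getD k 0
          match st.2.1.get? ps with
          | some idx =>
              (ps, st.2.1,
               PySem.List.slice array none (some (idx + 1)) ++
               PySem.List.slice array (some ((k : Int) + 1)) none)
          | none => (ps, st.2.1.insert ps (k : Int), st.2.2))
        (0, (PySem.Dict.empty).insert 0 (-1), []) with hst
      have hps : st.1 + array.getD m 0 = (pvP array).getD (m+1) 0 := by
        rw [h1, pvP_getD_succ array m hmn]
      have htk := pvP_take_succ array m hmn
      set v := (pvP array).getD (m+1) 0 with hv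
      -- case on whether the prefix sum was seen
      cases hidx : PySem.List.index? ((pvP array).take (m+1)) v with
      | some j =>
          have hmem : v ∈ (pvP array).take (m+1) := by
            have h := PySem.List.index?_isSome_iff (xs := (pvP array).take (m+1)) (v := v)
            rw [hidx] at h; exact h.mp rfl
          have hhit : pvHit array m = true := by
            unfold pvHit; rw [← hv]; exact decide_eq_true hmem
          have hget : st.2.1.get? (st.1 + array.getD m 0) = some ((j : Int) - 1) := by
            rw [hps, h2, hidx]; rfl
          simp only [hget]
          refine ⟨hps, ?_, ?_⟩
          · intro s
            rw [h2 s, htk]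
            by_cases hsm : s ∈ (pvP array).take (m+1)
            · rw [PySem.List.index?_append_of_mem _ hsm]
            · have hsv : s ≠ v := fun h => hsm (h ▸ hmem)
              have e1 : PySem.List.index? ((pvP array).take (m+1)) s = none := by
                rw [PySem.List.index?_eq_none_iff]; exact hsm
              have e2 : PySem.List.index? ((pvP array).take (m+1) ++ [v]) s = none := by
                rw [PySem.List.index?_eq_none_iff]; simp [hsm, hsv]
              rw [e1, e2]
          · -- result: collision at step m
            have hfull : PySem.List.index? (pvP array) v = some j := by
              rw [pv_index_take (pvP array) v (m+1) hmem, hidx]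
            simp only [pvR, List.range_succ, List.reverse_append, List.reverse_cons,
              List.reverse_nil, List.nil_append, List.cons_append, List.find?_cons, hhit]
            simp only [pvOutAt, ← hv, hfull]
            have e1 : PySem.List.slice array none (some ((j : Int) - 1 + 1)) = array.take j := by
              have : (j : Int) - 1 + 1 = (j : Nat) := by omega
              rw [this, PySem.List.slice_to_natCast]
            have e2 : PySem.List.slice array (some ((m : Int) + 1)) none = array.drop (m+1) := by
              have : (m : Int) + 1 = ((m + 1 : Nat) : Int) := by push_cast; ring
              rw [this, PySem.List.slice_from_natCast]
            rw [e1, e2]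
      | none =>
          have hmem : v ∉ (pvP array).take (m+1) := by
            rw [← PySem.List.index?_eq_none_iff]; exact hidx
          have hhit : pvHit array m = false := by
            unfold pvHit; rw [← hv]; exact decide_eq_false hmem
          have hget : st.2.1.get? (st.1 + array.getD m 0) = none := by
            rw [hps, h2, hidx]; rfl
          simp only [hget]
          refine ⟨hps, ?_, ?_⟩
          · intro s
            rw [PySem.Dict.get?_insert, htk]
            by_cases hsv : s = st.1 + array.getD m 0
            · subst hsv
              rw [hps, if_pos rfl, PySem.List.index?_append_singleton_self _ _ hmem,
                pvP_length_take array m (by omega)]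
              simp only [Option.map_some]
              congr 1
              push_cast
              ring
            · rw [if_neg hsv, h2 s]
              have hsv' : s ≠ v := fun h => hsv (h.trans hps.symm)
              by_cases hsm : s ∈ (pvP array).take (m+1)
              · rw [PySem.List.index?_append_of_mem _ hsm]
              · have e1 : PySem.List.index? ((pvP array).take (m+1)) s = none := by
                  rw [PySem.List.index?_eq_none_iff]; exact hsm
                have e2 : PySem.List.index? ((pvP array).take (m+1) ++ [v]) s = none := by
                  rw [PySem.List.index?_eq_none_iff]; simp [hsm, hsv']
                rw [e1, e2]
          · rw [h3]
            simp only [pvR, List.range_succ, List.reverse_append, List.reverse_cons,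
              List.reverse_nil, List.nil_append, List.cons_append, List.find?_cons, hhit]

theorem pvA_eq (array : List Int) :
    remove_zero_sum_subarray_from_array array = pvR array array.length := by
  unfold remove_zero_sum_subarray_from_array
  rw [PySem.List.pyRange_one]
  simp only [sub_zero, Int.toNat_natCast, List.foldl_map, zero_add,
    PySem.List.pyGetD_natCast]
  exact (pvA_inv array array.length le_rfl).2.2

theorem pv_setdefault_of_contains (d : PySem.Dict Int Int) (k v : Int)
    (h : d.contains k = true) : d.setdefault k v = d := by
  simp [PySem.Dict.setdefault, h]

theorem pv_setdefault_of_not_contains (d : PySem.Dict Int Int) (k v : Int)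
    (h : d.contains k = false) : d.setdefault k v = d.insert k v := by
  apply PySem.Dict.ext
  simp [PySem.Dict.setdefault, h, PySem.Dict.items_insert]

theorem pv_firstmap_inv (L : List Int) : ∀ m, m ≤ L.length → ∀ s : Int,
    ((List.range m).foldl
      (fun (d : PySem.Dict Int Int) (t : Nat) => d.setdefault (L.getD t 0) (t : Int))
      PySem.Dict.empty).get? s
      = Option.map (fun j : Nat => (j : Int)) (PySem.List.index? (L.take m) s) := by
  intro m
  induction m with
  | zero =>
      intro _ s
      simp only [List.range_zero, List.foldl_nil, List.take_zero, PySem.Dict.get?_empty]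
      have h0 : PySem.List.index? ([] : List Int) s = none := by
        rw [PySem.List.index?_eq_none_iff]; simp
      rw [h0]; rfl
  | succ m ih =>
      intro hm s
      rw [List.range_succ, List.foldl_append, List.foldl_cons, List.foldl_nil]
      set d := (List.range m).foldl
        (fun (d : PySem.Dict Int Int) (t : Nat) => d.setdefault (L.getD t 0) (t : Int))
        PySem.Dict.empty with hd
      have htk := pv_take_succ_getD L m (by omega)
      set v := L.getD m 0 with hv
      cases hidx : PySem.List.index? (L.take m) v with
      | some j =>
          have hmem : v ∈ L.take m := by
            have h := PySem.List.index?_isSome_iff (xs := L.take m) (v := v)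
            rw [hidx] at h; exact h.mp rfl
          have hc : d.contains v = true := by
            rw [PySem.Dict.contains_eq_isSome_get?, ih (by omega) v, hidx]; rfl
          rw [pv_setdefault_of_contains d v (m : Int) hc, ih (by omega) s, htk]
          by_cases hsm : s ∈ L.take m
          · rw [PySem.List.index?_append_of_mem _ hsm]
          · have hsv : s ≠ v := fun h => hsm (h ▸ hmem)
            have e1 : PySem.List.index? (L.take m) s = none := by
              rw [PySem.List.index?_eq_none_iff]; exact hsm
            have e2 : PySem.List.index? (L.take m ++ [v]) s = none := by
              rw [PySem.List.index?_eq_none_iff]; simp [hsm, hsv]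
            rw [e1, e2]
      | none =>
          have hmem : v ∉ L.take m := by
            rw [← PySem.List.index?_eq_none_iff]; exact hidx
          have hc : d.contains v = false := by
            rw [PySem.Dict.contains_eq_isSome_get?, ih (by omega) v, hidx]; rfl
          rw [pv_setdefault_of_not_contains d v (m : Int) hc, htk]
          rw [PySem.Dict.get?_insert]
          by_cases hsv : s = v
          · subst hsv
            rw [if_pos rfl, PySem.List.index?_append_singleton_self _ _ hmem]
            have hlen : (L.take m).length = m := by
              rw [List.length_take]; omega
            rw [hlen]; rfl
          · rw [if_neg hsv, ih (by omega) s]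
            by_cases hsm : s ∈ L.take m
            · rw [PySem.List.index?_append_of_mem _ hsm]
            · have e1 : PySem.List.index? (L.take m) s = none := by
                rw [PySem.List.index?_eq_none_iff]; exact hsm
              have e2 : PySem.List.index? (L.take m ++ [v]) s = none := by
                rw [PySem.List.index?_eq_none_iff]; simp [hsm, hsv]
              rw [e1, e2]

theorem pv_firstmap_get? (array : List Int) (s : Int) :
    (pvFirstMap (pvP array)).get? s
      = Option.map (fun j : Nat => (j : Int)) (PySem.List.index? (pvP array) s) := by
  unfold pvFirstMap
  rw [PySem.List.len_eq, PySem.List.pyRange_one]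
  simp only [sub_zero, Int.toNat_natCast, List.foldl_map, zero_add, PySem.List.pyGetD_natCast]
  have h := pv_firstmap_inv (pvP array) (pvP array).length le_rfl s
  rwa [List.take_length] at h

theorem pvB_inv (array : List Int) : ∀ m, m ≤ array.length →
    pvFindBack array (pvP array) (pvFirstMap (pvP array))
      (PySem.List.pyRange (m : Int) 0 (-1)) = pvR array m := by
  intro m
  induction m with
  | zero => intro _; rw [PySem.List.pyRange_neg_one_eq_nil (by norm_num)]; simp [pvFindBack, pvR]
  | succ m ih =>
      intro hm
      rw [PySem.List.pyRange_neg_one_cons (by positivity)]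
      have hrec : (((m + 1 : Nat) : Int) - 1) = (m : Int) := by push_cast; ring
      rw [hrec]
      have hvmem : (pvP array).getD (m+1) 0 ∈ pvP array := by
        have hl : m + 1 < (pvP array).length := by rw [pvP, pvPref_length]; omega
        have hmem := List.getElem_mem hl
        rwa [List.getD_eq_getElem?_getD, List.getElem?_eq_getElem hl] at *
      have hsome : (PySem.List.index? (pvP array) ((pvP array).getD (m+1) 0)).isSome := by
        rw [PySem.List.index?_isSome_iff]; exact hvmem
      obtain ⟨j, hj⟩ := Option.isSome_iff_exists.mp hsome
      have hg : (pvFirstMap (pvP array)).get? ((pvP array).getD (m+1) 0) = some ((j : Nat) : Int) := by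
        rw [pv_firstmap_get?, hj]; rfl
      simp only [pvFindBack, PySem.List.pyGetD_natCast, hg]
      have hlt := pv_index_lt_iff (pvP array) ((pvP array).getD (m+1) 0) j (m+1) hj
      by_cases hc : ((j : Nat) : Int) < ((m + 1 : Nat) : Int)
      · have hjm : j < m + 1 := by exact_mod_cast hc
        have hhit : pvHit array m = true := by
          unfold pvHit; exact decide_eq_true (hlt.mp hjm)
        rw [if_pos hc]
        simp only [pvR, List.range_succ, List.reverse_append, List.reverse_cons,
          List.reverse_nil, List.nil_append, List.cons_append, List.find?_cons, hhit]
        simp only [pvOutAt, hj]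
        rw [PySem.List.slice_to_natCast, PySem.List.slice_from_natCast]
      · have hjm : ¬ j < m + 1 := by
          intro h; exact hc (by exact_mod_cast h)
        have hhit : pvHit array m = false := by
          unfold pvHit
          exact decide_eq_false (fun h => hjm (hlt.mpr h))
        rw [if_neg hc, ih (by omega)]
        simp only [pvR, List.range_succ, List.reverse_append, List.reverse_cons,
          List.reverse_nil, List.nil_append, List.cons_append, List.find?_cons, hhit]

theorem pvB_eq (array : List Int) :
    remove_zero_sum_subarray_from_array_alt array = pvR array array.length := by
  unfold remove_zero_sum_subarray_from_array_alt
  exact pvB_inv array array.length le_rfl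

-- ===== VERDICT (by name: the statement is the Claim_ definition above) =====
theorem remove_zero_sum_subarray_from_array_spec : Claim_equal_remove_zero_sum_subarray_from_array := by
  intro array _
  unfold Spec_remove_zero_sum_subarray_from_array
  rw [pvA_eq, pvB_eq]
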